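-- pv_equiv track=rewrite | github.com/ezelikman/parsel | apps_backtranslate.py | function_lines
-- ===== SOURCE A (Python) =====
-- def function_lines(solution):
--   all_lines = [0]
--   in_function = False
--   for line in solution.split('\n'):
--     if len(line) == 0: continue
--     if line.startswith('def '):
--       in_function = True
--       all_lines.append(1)
--     elif len(line) == len(line.lstrip()):
--       in_function = False
--       all_lines.append(0)
--     elif line.startswith('from ') or line.startswith('import '):
--       in_function = False
--       all_lines.append(0)
--     elif in_function:
--       all_lines[-1] += 1
--   return all_lines
-- ===== SOURCE B (Python) =====
-- def function_lines(solution):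
--   # Pass 1: partition the non-empty lines into top-level blocks.
--   # blocks[0] is the preamble (lines before the first unindented line);
--   # a new block starts at every unindented non-empty line.
--   blocks = [[]]
--   for line in solution.split('\n'):
--     if len(line) == 0:
--       continue
--     if len(line) == len(line.lstrip()):
--       blocks.append([line])
--     else:
--       blocks[-1].append(line)
--   # Pass 2: a block headed by a 'def ' line counts all its lines; anything else counts 0.
--   return [len(b) if b and b[0].startswith('def ') else 0 for b in blocks]
-- ===== Notes on version B (the rewrite author's own statement) =====
-- stated objective: alternative
-- what changed: B replaces A's stateful single loop (in_function flag, in-place increment of the last count) by two passes: first partition the non-empty lines into explicit top-level blocks (preamble first, new block at each unindented line), then map each block to its count, which also drops A's dead from/import branch.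
import Mathlib
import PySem

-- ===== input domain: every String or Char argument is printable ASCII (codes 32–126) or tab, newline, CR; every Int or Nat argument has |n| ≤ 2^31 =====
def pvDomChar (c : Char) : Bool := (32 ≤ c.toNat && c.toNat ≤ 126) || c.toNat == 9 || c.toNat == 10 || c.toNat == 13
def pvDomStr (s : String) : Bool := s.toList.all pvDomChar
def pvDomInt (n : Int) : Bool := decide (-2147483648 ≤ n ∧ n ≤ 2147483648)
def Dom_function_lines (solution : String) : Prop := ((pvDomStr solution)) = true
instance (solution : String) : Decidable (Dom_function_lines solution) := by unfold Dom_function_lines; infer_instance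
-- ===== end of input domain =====

-- B partitions the non-empty lines into explicit top-level blocks and then maps each
-- block to its count, replacing A's stateful single loop (alternative decomposition).

-- ===== PORT A =====
-- all_lines[-1] += 1  (all_lines is always non-empty when this runs); exact hand port of the in-place update
def pvIncLast (xs : List Int) : List Int := xs.dropLast ++ [xs.getLast! + 1]

def pvStepA (st : List Int × Bool) (line : String) : List Int × Bool :=
  if PySem.Str.len line = 0 then st
  else if PySem.Str.startswith line "def " then (st.1 ++ [1], true)
  else if PySem.Str.len line = PySem.Str.len (PySem.Str.lstrip line) then (st.1 ++ [0], false)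
  else if PySem.Str.startswith line "from " || PySem.Str.startswith line "import " then (st.1 ++ [0], false)
  else if st.2 then (pvIncLast st.1, st.2)
  else st

def function_lines (solution : String) : List Int :=
  -- solution.split('\n'): split? is none only for sep = "", so getD [] is exact here
  (((PySem.Str.split? solution "\n").getD []).foldl pvStepA ([0], false)).1

-- ===== PORT B =====
-- blocks[-1].append(line)  (blocks is always non-empty); exact hand port of the in-place update
def pvStepB (blocks : List (List String)) (line : String) : List (List String) :=
  if PySem.Str.len line = 0 then blocks
  else if PySem.Str.len line = PySem.Str.len (PySem.Str.lstrip line) then blocks ++ [[line]]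
  else blocks.dropLast ++ [blocks.getLast! ++ [line]]

-- len(b) if b and b[0].startswith('def ') else 0
def pvCount (b : List String) : Int :=
  match b with
  | [] => 0
  | h :: _ => if PySem.Str.startswith h "def " then (b.length : Int) else 0

def function_lines_alt (solution : String) : List Int :=
  ((((PySem.Str.split? solution "\n").getD []).foldl pvStepB [[]])).map pvCount

-- ===== PRECONDITION & SPEC =====
def Spec_function_lines (solution : String) (out : List Int) : Prop := out = function_lines_alt solution
instance (solution : String) (out : List Int) : Decidable (Spec_function_lines solution out) := by unfold Spec_function_lines; infer_instance

-- ===== CLAIM (what is proved, stated in full; the proofs are below) =====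
def Claim_equal_function_lines : Prop := ∀ (solution : String), Dom_function_lines solution → Spec_function_lines solution (function_lines solution)

-- ===== LEMMAS AND PROOFS =====

-- the in_function flag of A, read off B's block list: true iff the last block is headed by a 'def ' line
def pvInf (blocks : List (List String)) : Bool :=
  match blocks.getLast? with
  | some (h :: _) => PySem.Str.startswith h "def "
  | _ => false

theorem pv_getLast!_concat {α : Type} [Inhabited α] (L : List α) (b : α) : (L ++ [b]).getLast! = b := by
  rw [List.getLast!_eq_getLast?_getD]; simp

theorem pvInf_concat (L : List (List String)) (b : List String) :
    pvInf (L ++ [b]) = match b with | h :: _ => PySem.Str.startswith h "def " | [] => false := by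
  unfold pvInf; rw [List.getLast?_append]; cases b <;> simp

theorem pvInf_concat2 (L : List (List String)) (b c : List String) :
    pvInf (L ++ [b, c]) = match c with | h :: _ => PySem.Str.startswith h "def " | [] => false := by
  rw [show L ++ [b, c] = (L ++ [b]) ++ [c] by simp, pvInf_concat]

-- a line starting with a non-space character is unchanged by lstrip
theorem pv_lstrip_of_startswith (line : String) (c : Char) (ps : List Char)
    (hc : PySem.Chars.isspace c = false)
    (h : PySem.Chars.startswith line.toList (c :: ps) = true) :
    PySem.Str.len (PySem.Str.lstrip line) = PySem.Str.len line := by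
  simp only [PySem.Chars.startswith] at h
  obtain ⟨t, ht⟩ := List.isPrefixOf_iff_prefix.mp h
  simp only [PySem.Str.len_eq, PySem.Str.toList_lstrip, PySem.Chars.lstrip]
  rw [← ht]; simp [hc]

-- an indented line (shortened by lstrip) starts with a space, hence has no non-space prefix
theorem pv_not_startswith_of_indent (line p : String) (c : Char) (ps : List Char)
    (hp : p.toList = c :: ps) (hc : PySem.Chars.isspace c = false)
    (h : ¬ PySem.Str.len line = PySem.Str.len (PySem.Str.lstrip line)) :
    PySem.Str.startswith line p = false := by
  by_contra hmm
  rw [Bool.not_eq_false, PySem.Str.startswith_eq, hp] at hmm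
  exact h (pv_lstrip_of_startswith line c ps hc hmm).symm

theorem pv_dropLast_concat {α : Type} (L : List α) (b : α) : (L ++ [b]).dropLast = L := by simp

theorem pv_step_eq (blocks : List (List String)) (hne : blocks ≠ []) (line : String) :
    pvStepA ((blocks.map pvCount), pvInf blocks) line
      = ((pvStepB blocks line).map pvCount, pvInf (pvStepB blocks line))
    ∧ pvStepB blocks line ≠ [] := by
  obtain hnil | ⟨L, b, rfl⟩ := List.eq_nil_or_concat blocks
  · exact absurd hnil hne
  simp only [List.concat_eq_append] at *
  by_cases h0 : PySem.Str.len line = 0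
  · -- empty line: both loops skip it
    have hB : pvStepB (L ++ [b]) line = L ++ [b] := by unfold pvStepB; rw [if_pos h0]
    have hA : pvStepA ((L ++ [b]).map pvCount, pvInf (L ++ [b])) line
        = ((L ++ [b]).map pvCount, pvInf (L ++ [b])) := by unfold pvStepA; rw [if_pos h0]
    rw [hA, hB]; exact ⟨rfl, by simp⟩
  by_cases htop : PySem.Str.len line = PySem.Str.len (PySem.Str.lstrip line)
  · -- top-level line: B starts a new block, A appends 1 or 0
    have hB : pvStepB (L ++ [b]) line = (L ++ [b]) ++ [[line]] := by
      unfold pvStepB; rw [if_neg h0, if_pos htop]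
    rw [hB]
    refine ⟨?_, by simp⟩
    unfold pvStepA
    by_cases hdef : PySem.Str.startswith line "def "
    · rw [if_neg h0, if_pos hdef]
      have hdef2 : PySem.Chars.startswith line.toList ['d','e','f',' '] = true := by
        simpa using hdef
      simp [pvCount, pvInf_concat2, hdef2]
    · rw [if_neg h0, if_neg hdef, if_pos htop]
      have hdef' : PySem.Chars.startswith line.toList ['d','e','f',' '] = false := by
        simpa using hdef
      simp [pvCount, pvInf_concat2, hdef']
  · -- indented line: it begins with whitespace, so no 'def '/'from '/'import ' prefix
    have hdef : PySem.Str.startswith line "def " = false :=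
      pv_not_startswith_of_indent line "def " 'd' "ef ".toList rfl (by decide) htop
    have hfrom : PySem.Str.startswith line "from " = false :=
      pv_not_startswith_of_indent line "from " 'f' "rom ".toList rfl (by decide) htop
    have himp : PySem.Str.startswith line "import " = false :=
      pv_not_startswith_of_indent line "import " 'i' "mport ".toList rfl (by decide) htop
    have hB : pvStepB (L ++ [b]) line = L ++ [b ++ [line]] := by
      unfold pvStepB
      rw [if_neg h0, if_neg htop, pv_getLast!_concat, pv_dropLast_concat]
    rw [hB]
    refine ⟨?_, by simp⟩
    unfold pvStepA
    rw [if_neg h0, if_neg (by simpa using hdef), if_neg htop, if_neg (by simp; exact ⟨by simpa using hfrom, by simpa using himp⟩),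
      pvInf_concat, pvInf_concat]
    have hdef' : PySem.Chars.startswith line.toList ['d','e','f',' '] = false := by
      simpa using hdef
    cases b with
    | nil => simp [pvCount, hdef']
    | cons h t =>
      by_cases hbd : PySem.Str.startswith h "def "
      · rw [if_pos (by simpa using hbd)]
        have hbd' : PySem.Chars.startswith h.toList ['d','e','f',' '] = true := by
          simpa using hbd
        simp [pvIncLast, pvCount, hbd']
      · rw [if_neg (by simpa using hbd)]
        have hbd' : PySem.Chars.startswith h.toList ['d','e','f',' '] = false := by
          simpa using hbd
        simp [pvCount, hbd']

theorem pv_fold_eq (lines : List String) (blocks : List (List String)) (hne : blocks ≠ []) :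
    lines.foldl pvStepA ((blocks.map pvCount), pvInf blocks)
      = ((lines.foldl pvStepB blocks).map pvCount, pvInf (lines.foldl pvStepB blocks)) := by
  induction lines generalizing blocks with
  | nil => rfl
  | cons l ls ih =>
    obtain ⟨hstep, hne'⟩ := pv_step_eq blocks hne l
    simp only [List.foldl_cons, hstep]
    exact ih _ hne'

-- ===== VERDICT (by name: the statement is the Claim_ definition above) =====
theorem function_lines_spec : Claim_equal_function_lines := by
  intro solution _
  unfold Spec_function_lines function_lines function_lines_alt
  have h0 : (([[]] : List (List String)).map pvCount) = [(0 : Int)] := by simp [pvCount]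
  have h1 : pvInf [[]] = false := by rfl
  rw [← h0, ← h1, pv_fold_eq _ _ (by simp)]
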